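-- pv_equiv track=rewrite | github.com/spydy2386/scripting-practice- | doors.py | door_calc
-- ===== SOURCE A (Python) =====
-- def door_calc(N = 5):
--     # calcuate the doors which will be open or closed at the end of the sequence
--     array = []
--     for ii in range (1, N+1):
--         array.append(1)
--         for jj in range (1, ii):
--             if ii%jj == 0 :
--                 array[jj-1] = 1 - array[jj-1]
--     return array
-- ===== SOURCE B (Python) =====
-- def door_calc(N=5):
--     # door p is toggled once per multiple of p in 1..N, i.e. N//p times:
--     # it ends open (1) exactly when N//p is odd.
--     return [1 if (N // p) % 2 else 0 for p in range(1, N + 1)]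
-- ===== Notes on version B (the rewrite author's own statement) =====
-- stated objective: faster
-- what changed: Replaces the nested toggle simulation by the closed form: door p ends at 1 iff floor(N/p) (its number of toggles) is odd, computed in one pass.
import Mathlib
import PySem

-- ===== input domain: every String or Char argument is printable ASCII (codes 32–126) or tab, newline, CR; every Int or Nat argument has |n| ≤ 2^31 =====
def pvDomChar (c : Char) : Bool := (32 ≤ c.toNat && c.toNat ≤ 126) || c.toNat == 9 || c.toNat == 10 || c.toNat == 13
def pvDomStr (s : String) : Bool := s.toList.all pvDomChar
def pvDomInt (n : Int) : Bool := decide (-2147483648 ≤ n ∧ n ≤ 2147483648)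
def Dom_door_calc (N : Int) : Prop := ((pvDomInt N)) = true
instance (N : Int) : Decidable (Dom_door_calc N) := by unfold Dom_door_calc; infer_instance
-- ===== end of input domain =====

-- B replaces A's O(N^2) nested toggle simulation by the closed form
-- "door p is 1 iff floor(N/p) is odd", one pass over the doors.

-- ===== PORT A =====
-- inner loop body: 'if ii % jj == 0: array[jj-1] = 1 - array[jj-1]'
-- (jj-1 is always a nonneg in-range index here, so set/getD are exact)
def pvTog (ii : Int) (arr : List Int) (jj : Int) : List Int :=
  if PySem.Int.mod ii jj = 0 then
    arr.set (jj - 1).toNat (1 - arr.getD (jj - 1).toNat 0)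
  else arr

def door_calc (N : Int) : List Int :=
  (PySem.List.pyRange 1 (N + 1) 1).foldl
    (fun array ii => (PySem.List.pyRange 1 ii 1).foldl (pvTog ii) (array ++ [1])) []

-- ===== PORT B =====
def door_calc_alt (N : Int) : List Int :=
  (PySem.List.pyRange 1 (N + 1) 1).map
    (fun p => if PySem.Int.mod (PySem.Int.floordiv N p) 2 ≠ 0 then 1 else 0)

-- ===== PRECONDITION & SPEC =====
def Spec_door_calc (N : Int) (out : List Int) : Prop := out = door_calc_alt N
instance (N : Int) (out : List Int) : Decidable (Spec_door_calc N out) := by unfold Spec_door_calc; infer_instance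

-- ===== CLAIM (what is proved, stated in full; the proofs are below) =====
def Claim_equal_door_calc : Prop := ∀ (N : Int), Dom_door_calc N → Spec_door_calc N (door_calc N)

-- ===== LEMMAS AND PROOFS =====

-- closed-form value of door p after processing doors 1..n
def pvVal (n p : Nat) : Int := if n / p % 2 = 1 then 1 else 0

def pvModel (n : Nat) : List Int := (List.range n).map (fun j => pvVal n (j + 1))

-- the inner toggle fold, characterized pointwise
theorem pvTog_fold (ii : Int) (m : Nat) (L : List Int) (hm : m ≤ L.length + 1) :
    (PySem.List.pyRange 1 (m : Int) 1).foldl (pvTog ii) L =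
      L.mapIdx (fun j x =>
        if j + 2 ≤ m ∧ PySem.Int.mod ii ((j : Int) + 1) = 0 then 1 - x else x) := by
  induction m with
  | zero =>
    rw [PySem.List.pyRange_one_eq_nil (by omega)]
    simp [List.mapIdx_eq_zipIdx_map]
  | succ m ih =>
    by_cases h1 : 1 ≤ m
    · have hm' : m ≤ L.length + 1 := by omega
      rw [show ((m + 1 : Nat) : Int) = (m : Int) + 1 by push_cast; ring,
          PySem.List.pyRange_one_succ_right (by exact_mod_cast h1),
          List.foldl_append, ih hm']
      simp only [List.foldl_cons, List.foldl_nil]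
      unfold pvTog
      have hlen : m - 1 < L.length := by omega
      have hcast : ((m - 1 : Nat) : Int) + 1 = (m : Int) := by omega
      by_cases hd : PySem.Int.mod ii (m : Int) = 0
      · rw [if_pos hd, show ((m : Int) - 1).toNat = m - 1 by omega]
        apply List.ext_getElem
        · simp
        · intro j hj1 hj2
          simp only [List.length_set, List.length_mapIdx] at hj1 hj2
          rw [List.getElem_set, List.getElem_mapIdx, List.getElem_mapIdx]
          by_cases hjm : m - 1 = j
          · rw [if_pos hjm]
            subst hjm
            rw [List.getD_eq_getElem _ 0 (by simpa using hlen), List.getElem_mapIdx, hcast,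
                if_neg (fun h => by omega : ¬((m - 1) + 2 ≤ m ∧ PySem.Int.mod ii (m : Int) = 0)),
                if_pos ⟨by omega, hd⟩]
          · rw [if_neg hjm]
            have hiff : (j + 2 ≤ m ∧ PySem.Int.mod ii ((j : Int) + 1) = 0) ↔
                (j + 2 ≤ m + 1 ∧ PySem.Int.mod ii ((j : Int) + 1) = 0) :=
              ⟨fun ⟨a, b⟩ => ⟨by omega, b⟩, fun ⟨a, b⟩ => ⟨by omega, b⟩⟩
            simp only [hiff]
      · rw [if_neg hd]
        apply List.ext_getElem
        · simp
        · intro j hj1 hj2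
          simp only [List.length_mapIdx] at hj1 hj2
          rw [List.getElem_mapIdx, List.getElem_mapIdx]
          by_cases hjm : m - 1 = j
          · subst hjm
            rw [hcast,
                if_neg (fun h => by omega : ¬((m - 1) + 2 ≤ m ∧ PySem.Int.mod ii (m : Int) = 0)),
                if_neg (fun h => hd h.2 : ¬((m - 1) + 2 ≤ m + 1 ∧ PySem.Int.mod ii (m : Int) = 0))]
          · have hiff : (j + 2 ≤ m ∧ PySem.Int.mod ii ((j : Int) + 1) = 0) ↔
                (j + 2 ≤ m + 1 ∧ PySem.Int.mod ii ((j : Int) + 1) = 0) :=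
              ⟨fun ⟨a, b⟩ => ⟨by omega, b⟩, fun ⟨a, b⟩ => ⟨by omega, b⟩⟩
            simp only [hiff]
    · have hm0 : m = 0 := by omega
      subst hm0
      rw [show ((1 : Nat) : Int) = 1 by norm_num, PySem.List.pyRange_one_eq_nil (by omega)]
      simp [List.mapIdx_eq_zipIdx_map]

theorem pvA_model (n : Nat) : door_calc (n : Int) = pvModel n := by
  induction n with
  | zero =>
    unfold door_calc pvModel
    rw [show ((0 : Nat) : Int) + 1 = 1 by norm_num, PySem.List.pyRange_one_eq_nil (by omega)]
    simp
  | succ n ih =>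
    unfold door_calc
    rw [show ((n + 1 : Nat) : Int) + 1 = ((n : Int) + 1) + 1 by push_cast; ring,
        PySem.List.pyRange_one_succ_right (by omega), List.foldl_append]
    have ih' : (PySem.List.pyRange 1 ((n : Int) + 1) 1).foldl
        (fun array ii => (PySem.List.pyRange 1 ii 1).foldl (pvTog ii) (array ++ [1])) [] = pvModel n := ih
    rw [ih']
    simp only [List.foldl_cons, List.foldl_nil]
    have hL : (pvModel n ++ [1]).length = n + 1 := by simp [pvModel]
    rw [show ((n : Int) + 1) = ((n + 1 : Nat) : Int) by push_cast; ring,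
        pvTog_fold ((n + 1 : Nat) : Int) (n + 1) (pvModel n ++ [1]) (by omega)]
    apply List.ext_getElem
    · simp [pvModel]
    · intro j hj1 hj2
      simp only [List.length_mapIdx, hL] at hj1
      rw [List.getElem_mapIdx]
      have hRHS : (pvModel (n + 1))[j] = pvVal (n + 1) (j + 1) := by
        simp [pvModel]
      rw [hRHS]
      by_cases hjn : j < n
      · rw [List.getElem_append_left (by simpa [pvModel] using hjn)]
        have hLj : (pvModel n)[j]'(by simpa [pvModel] using hjn) = pvVal n (j + 1) := by
          simp [pvModel]
        rw [hLj]
        have hmodiff : PySem.Int.mod ((n + 1 : Nat) : Int) ((j : Int) + 1) = 0 ↔ (j + 1) ∣ (n + 1) := by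
          rw [PySem.Int.mod_eq_zero_iff_dvd, show ((j : Int) + 1) = ((j + 1 : Nat) : Int) by push_cast; ring]
          exact Int.natCast_dvd_natCast
        by_cases hdvd : (j + 1) ∣ (n + 1)
        · have hq : (n + 1) / (j + 1) = n / (j + 1) + 1 := by
            rw [Nat.succ_div, if_pos hdvd]
          rw [if_pos ⟨by omega, hmodiff.mpr hdvd⟩]
          unfold pvVal
          rw [hq]
          split_ifs <;> omega
        · have hq : (n + 1) / (j + 1) = n / (j + 1) := by
            rw [Nat.succ_div, if_neg hdvd, Nat.add_zero]
          rw [if_neg (fun h => hdvd (hmodiff.mp h.2))]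
          unfold pvVal
          rw [hq]
      · have hj : j = n := by omega
        subst hj
        rw [List.getElem_append_right (by simp [pvModel])]
        have h1 : ([ (1 : Int) ])[j - (pvModel j).length]'(by simp [pvModel]) = 1 := by
          simp [pvModel]
        rw [h1, if_neg (fun h => by omega)]
        unfold pvVal
        rw [Nat.div_self (by omega)]
        norm_num

theorem pvB_model (n : Nat) : door_calc_alt (n : Int) = pvModel n := by
  unfold door_calc_alt pvModel
  rw [PySem.List.pyRange_one, show ((n : Int) + 1 - 1).toNat = n by omega, List.map_map]
  apply List.map_congr_left
  intro k hk
  have hk' : k < n := List.mem_range.mp hk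
  show (if PySem.Int.mod (PySem.Int.floordiv (n : Int) (1 + (k : Int))) 2 ≠ 0 then (1:Int) else 0)
      = pvVal n (k + 1)
  rw [show (1 + (k : Int)) = ((k + 1 : Nat) : Int) by push_cast; ring,
      PySem.Int.floordiv_natCast, show (2:Int) = ((2:Nat):Int) by norm_num,
      PySem.Int.mod_natCast]
  unfold pvVal
  split_ifs with h1 h2 h2 <;> first
    | rfl
    | (exfalso; omega)

-- ===== VERDICT (by name: the statement is the Claim_ definition above) =====
theorem door_calc_spec : Claim_equal_door_calc := by
  intro N _
  unfold Spec_door_calc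
  by_cases h : 0 ≤ N
  · obtain ⟨n, rfl⟩ := Int.eq_ofNat_of_zero_le h
    rw [pvA_model, pvB_model]
  · have he : PySem.List.pyRange 1 (N + 1) 1 = [] :=
      PySem.List.pyRange_one_eq_nil (by omega)
    -- note: here N < 0
    simp [door_calc, door_calc_alt, he]
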